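-- pv_equiv track=rewrite | github.com/jiahuiiiii/Coding-Challenge | feb21.py | happiness_number
-- ===== SOURCE A (Python) =====
-- def happiness_number(s):
--     lol = 0
--     for i in range(len(s)-1):
--         if (s[i] + s[i+1]) in [':)','(:']:
--             lol += 1
--         elif (s[i] + s[i+1]) in [':(','):']:
--             lol -= 1
--
--     return lol
-- ===== SOURCE B (Python) =====
-- def happiness_number(s):
--     return s.count(':)') + s.count('(:') - s.count(':(') - s.count('):')
-- ===== Notes on version B (the rewrite author's own statement) =====
-- stated objective: simpler
-- what changed: Replaced the index loop over adjacent positions with four non-overlapping substring counts (str.count), valid because no pattern self-overlaps and the four patterns are mutually exclusive.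
import Mathlib
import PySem

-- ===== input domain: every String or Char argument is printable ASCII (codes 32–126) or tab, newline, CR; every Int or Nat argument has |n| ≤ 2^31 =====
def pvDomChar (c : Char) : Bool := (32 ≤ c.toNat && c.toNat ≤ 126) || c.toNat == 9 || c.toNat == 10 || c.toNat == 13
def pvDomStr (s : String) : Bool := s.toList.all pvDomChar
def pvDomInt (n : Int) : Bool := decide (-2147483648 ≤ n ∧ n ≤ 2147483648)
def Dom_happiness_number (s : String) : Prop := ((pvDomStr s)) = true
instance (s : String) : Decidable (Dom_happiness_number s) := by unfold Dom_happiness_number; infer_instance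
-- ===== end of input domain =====

-- B replaces the manual adjacent-pair loop with four substring counts (str.count); simpler, and
-- measurably faster by a constant factor (C-level scanning instead of a per-character Python loop).

-- ===== PORT A =====
def happiness_number (s : String) : Int :=
  (PySem.List.pyRange 0 (PySem.List.len s.toList - 1) 1).foldl
    (fun lol i =>
      if [PySem.List.pyGetD s.toList i ' '] ++ [PySem.List.pyGetD s.toList (i + 1) ' ']
           ∈ [[':', ')'], ['(', ':']] then lol + 1
      else if [PySem.List.pyGetD s.toList i ' '] ++ [PySem.List.pyGetD s.toList (i + 1) ' ']
           ∈ [[':', '('], [')', ':']] then lol - 1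
      else lol)
    0

-- ===== PORT B =====
def happiness_number_alt (s : String) : Int :=
  (PySem.Str.count s ":)" : Int) + (PySem.Str.count s "(:" : Int)
    - (PySem.Str.count s ":(" : Int) - (PySem.Str.count s "):" : Int)

-- ===== PRECONDITION & SPEC =====
def Spec_happiness_number (s : String) (out : Int) : Prop := out = happiness_number_alt s
instance (s : String) (out : Int) : Decidable (Spec_happiness_number s out) := by unfold Spec_happiness_number; infer_instance

-- ===== CLAIM (what is proved, stated in full; the proofs are below) =====
def Claim_equal_happiness_number : Prop := ∀ (s : String), Dom_happiness_number s → Spec_happiness_number s (happiness_number s)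

-- ===== LEMMAS AND PROOFS =====

-- str.count of a two-char pattern whose characters differ counts exactly the matching
-- adjacent positions (non-overlapping = per-position here, since the pattern cannot self-overlap).
theorem count_go_nil (sub : List Char) (fuel acc : Nat) :
    PySem.Chars.count.go sub fuel [] acc = acc := by
  cases fuel <;> simp [PySem.Chars.count.go]

theorem count_go_pairs (a b : Char) (hab : a ≠ b) :
    ∀ (fuel : Nat) (l : List Char) (acc : Nat), l.length ≤ fuel →
      PySem.Chars.count.go [a, b] fuel l acc = acc + (l.zip l.tail).count (a, b) := by
  intro fuel
  induction fuel with
  | zero =>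
    intro l acc hl
    have : l = [] := List.eq_nil_of_length_eq_zero (Nat.le_zero.mp hl)
    subst this
    simp [PySem.Chars.count.go]
  | succ n ih =>
    intro l acc hl
    match l with
    | [] => simp [PySem.Chars.count.go]
    | [h] =>
      have hp : [a, b].isPrefixOf [h] = false := by simp [List.isPrefixOf]
      simp [PySem.Chars.count.go, hp, count_go_nil]
    | h :: h2 :: t =>
      have hlen : t.length ≤ n := by simp at hl; omega
      by_cases hp : [a, b].isPrefixOf (h :: h2 :: t) = true
      · have h1 : a = h ∧ b = h2 := by simpa [List.isPrefixOf] using hp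
        obtain ⟨rfl, rfl⟩ := h1
        have hstep : PySem.Chars.count.go [a, b] (n + 1) (a :: b :: t) acc
            = PySem.Chars.count.go [a, b] n t (acc + 1) := by
          simp [PySem.Chars.count.go, hp]
        rw [hstep, ih t (acc + 1) hlen]
        have hzip : ((b :: t).zip t).count (a, b) = (t.zip t.tail).count (a, b) := by
          cases t with
          | nil => simp
          | cons h3 t3 =>
            have : ¬((b, h3) = (a, b)) := by
              intro hc; injection hc with hc1 hc2; exact hab (hc1 ▸ rfl)
            simp only [List.tail_cons, List.zip_cons_cons, List.count_cons]
            simp [this]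
        simp only [List.tail_cons, List.zip_cons_cons, List.count_cons, hzip]
        simp
        omega
      · have hstep : PySem.Chars.count.go [a, b] (n + 1) (h :: h2 :: t) acc
            = PySem.Chars.count.go [a, b] n (h2 :: t) acc := by
          simp [PySem.Chars.count.go, hp]
        have hlen2 : (h2 :: t).length ≤ n := by simp at hl ⊢; omega
        rw [hstep, ih (h2 :: t) acc hlen2]
        have hne : ¬((h, h2) = (a, b)) := by
          intro hc; injection hc with hc1 hc2
          exact hp (by simp [List.isPrefixOf, hc1, hc2])
        simp only [List.tail_cons, List.zip_cons_cons, List.count_cons]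
        simp [hne]

theorem count_pairs (a b : Char) (hab : a ≠ b) (cs : List Char) :
    PySem.Chars.count cs [a, b] = (cs.zip cs.tail).count (a, b) := by
  have h := count_go_pairs a b hab cs.length cs 0 (le_refl _)
  simp [PySem.Chars.count]
  rw [h]
  simp

-- the range-over-indices fold over adjacent pairs equals the fold over zip of the list with its tail
theorem range_pairs_fold (g : Int → Char → Char → Int) :
    ∀ (cs : List Char) (acc : Int),
      (List.range (cs.length - 1)).foldl
        (fun l k => g l (cs.getD k ' ') (cs.getD (k + 1) ' ')) acc
      = (cs.zip cs.tail).foldl (fun l p => g l p.1 p.2) acc := by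
  intro cs
  induction cs with
  | nil => intro acc; simp
  | cons c cs' ih =>
    intro acc
    cases cs' with
    | nil => simp
    | cons c2 t =>
      have hlen : (c :: c2 :: t).length - 1 = t.length + 1 := by simp
      rw [hlen, List.range_succ_eq_map, List.foldl_cons, List.foldl_map]
      simp only [List.getD_cons_succ, List.getD_cons_zero, Nat.succ_eq_add_one]
      have hthis := ih (g acc c c2)
      have hlen2 : (c2 :: t).length - 1 = t.length := by simp
      rw [hlen2] at hthis
      simp only [List.getD_cons_succ] at hthis
      simp only [List.tail_cons, List.zip_cons_cons, List.foldl_cons]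
      exact hthis

-- the adjacent-pair fold with A's scoring equals the four pattern counts
theorem pair_fold_counts :
    ∀ (ps : List (Char × Char)) (acc : Int),
      ps.foldl (fun l p =>
        if [p.1] ++ [p.2] ∈ [[':', ')'], ['(', ':']] then l + 1
        else if [p.1] ++ [p.2] ∈ [[':', '('], [')', ':']] then l - 1
        else l) acc
      = acc + (ps.count (':', ')') : Int) + (ps.count ('(', ':') : Int)
          - (ps.count (':', '(') : Int) - (ps.count (')', ':') : Int) := by
  intro ps
  induction ps with
  | nil => intro acc; simp
  | cons p ps ih =>
    intro acc
    obtain ⟨x, y⟩ := p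
    rw [List.foldl_cons, ih]
    simp only [List.count_cons]
    split_ifs <;> simp_all
    all_goals first | tauto | omega

-- ===== VERDICT (by name: the statement is the Claim_ definition above) =====
theorem happiness_number_spec : Claim_equal_happiness_number := by
  intro s _
  unfold Spec_happiness_number happiness_number happiness_number_alt
  simp only [PySem.Str.count_eq]
  set cs := s.toList with hcs
  have hA :
      (PySem.List.pyRange 0 (PySem.List.len cs - 1) 1).foldl
        (fun (lol : Int) (i : Int) =>
          if [PySem.List.pyGetD cs i ' '] ++ [PySem.List.pyGetD cs (i + 1) ' ']
               ∈ [[':', ')'], ['(', ':']] then lol + 1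
          else if [PySem.List.pyGetD cs i ' '] ++ [PySem.List.pyGetD cs (i + 1) ' ']
               ∈ [[':', '('], [')', ':']] then lol - 1
          else lol) 0
      = (cs.zip cs.tail).foldl (fun (l : Int) p =>
          if [p.1] ++ [p.2] ∈ [[':', ')'], ['(', ':']] then l + 1
          else if [p.1] ++ [p.2] ∈ [[':', '('], [')', ':']] then l - 1
          else l) 0 := by
    cases cs with
    | nil => simp [PySem.List.len]
    | cons c t =>
      have h1 : PySem.List.len (c :: t) - 1 = (((c :: t).length - 1 : Nat) : Int) := by
        simp [PySem.List.len_eq]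
      rw [h1, PySem.List.pyRange_zero_natCast]
      simp only [List.foldl_map]
      have hget1 : ∀ (k : Nat), PySem.List.pyGetD (c :: t) ((k : Int) + 1) ' ' = (c :: t).getD (k + 1) ' ' := by
        intro k
        rw [show ((k : Int) + 1) = ((k + 1 : Nat) : Int) by push_cast; ring, PySem.List.pyGetD_natCast]
      simp only [hget1, PySem.List.pyGetD_natCast]
      exact range_pairs_fold (fun l x y =>
        if [x] ++ [y] ∈ [[':', ')'], ['(', ':']] then l + 1
        else if [x] ++ [y] ∈ [[':', '('], [')', ':']] then l - 1
        else l) (c :: t) 0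
  rw [hA, pair_fold_counts]
  rw [show (":)".toList) = [':', ')'] from rfl,
      show ("(:".toList) = ['(', ':'] from rfl,
      show (":(".toList) = [':', '('] from rfl,
      show ("):".toList) = [')', ':'] from rfl]
  rw [count_pairs ':' ')' (by decide) cs, count_pairs '(' ':' (by decide) cs,
      count_pairs ':' '(' (by decide) cs, count_pairs ')' ':' (by decide) cs]
  ring
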